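-- pv_equiv track=rewrite | github.com/bonilab/PSU-CIDD-MaSim-Support | Calibration/include/calibrationLib.py | get_bin
-- ===== SOURCE A (Python) =====
-- def get_bin(value, bins):
--     # Sort the bins and step through them
--     bins.sort()
--     for item in bins:
--         if value < item:
--             return item
--
--     # For values greater than the largest bin, return that one
--     if item >= max(bins):
--         return max(bins)
--
--     # Throw an error if we couldn't find a match (shouldn't happen)
--     raise Exception("Matching bin not found for value: " + str(value))
-- ===== SOURCE B (Python) =====
-- def get_bin(value, bins):
--     # Sort in place (same observable mutation as the original), then binary-search
--     # (bisect_right) for the first bin greater than value instead of scanning linearly.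
--     bins.sort()
--     lo, hi = 0, len(bins)
--     while lo < hi:
--         mid = (lo + hi) // 2
--         if value < bins[mid]:
--             hi = mid
--         else:
--             lo = mid + 1
--     return bins[lo] if lo < len(bins) else bins[-1]
-- ===== Notes on version B (the rewrite author's own statement) =====
-- stated objective: alternative
-- what changed: Replaces the linear scan over the sorted bins (plus a max() recomputation for the overflow case) with an in-place sort followed by a hand-written bisect_right binary search; the insertion point directly yields the answer, falling back to bins[-1] when the value is at least every bin.
import Mathlib
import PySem

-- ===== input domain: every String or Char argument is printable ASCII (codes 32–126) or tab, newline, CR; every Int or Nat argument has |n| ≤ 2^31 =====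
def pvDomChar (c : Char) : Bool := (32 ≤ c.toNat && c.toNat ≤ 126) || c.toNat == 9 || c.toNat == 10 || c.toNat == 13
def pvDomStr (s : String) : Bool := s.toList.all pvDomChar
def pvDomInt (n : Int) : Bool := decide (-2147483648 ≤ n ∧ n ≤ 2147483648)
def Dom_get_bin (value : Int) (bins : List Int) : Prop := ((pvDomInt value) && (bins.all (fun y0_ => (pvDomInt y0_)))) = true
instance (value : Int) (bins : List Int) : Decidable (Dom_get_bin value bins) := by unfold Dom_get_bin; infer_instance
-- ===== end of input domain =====

-- B replaces A's linear scan over the sorted bins with an in-place sort plus a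
-- bisect_right-style binary search (same return values; both sort `bins` in place).


-- ===== PORT A =====
-- the `for item in bins: if value < item: return item` loop
def pvLoopA (value : Int) : List Int → Option Int
  | [] => none
  | x :: xs => if value < x then some x else pvLoopA value xs

def get_bin (value : Int) (bins : List Int) : Int :=
  let bins := PySem.List.sorted bins (fun x => x)   -- bins.sort() (in-place: shadowed)
  match pvLoopA value bins with
  | some r => r
  | none =>
    -- after the loop `item` holds the last element iterated (last of the sorted list)
    let item := PySem.List.pyGetD bins (-1) 0
    match PySem.List.max? bins (fun x => x) with
    | some m => if item ≥ m then m else 0   -- else-branch = `raise Exception(...)`, never reached on Pre_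
    | none => 0                             -- max([]) raises; bins = [] is excluded by Pre_

-- ===== PORT B =====
-- the `while lo < hi` bisect_right loop of Source B
-- fuel = hi - lo bounds the iteration count; it only makes the recursion structural
def pvBsLoop (s : List Int) (value : Int) : Nat → Nat → Nat → Nat
  | 0, lo, _ => lo
  | fuel + 1, lo, hi =>
    if lo < hi then
      let mid := (lo + hi) / 2
      if value < s.getD mid 0 then pvBsLoop s value fuel lo mid
      else pvBsLoop s value fuel (mid + 1) hi
    else lo

def get_bin_alt (value : Int) (bins : List Int) : Int :=
  let bins := PySem.List.sorted bins (fun x => x)   -- bins.sort() (in-place: shadowed)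
  let lo := pvBsLoop bins value bins.length 0 bins.length
  if lo < bins.length then bins.getD lo 0 else PySem.List.pyGetD bins (-1) 0

-- ===== PRECONDITION & SPEC =====
-- Pre_ excludes only bins = [], where Python A raises UnboundLocalError (and B raises IndexError).
def Pre_get_bin (value : Int) (bins : List Int) : Prop := bins ≠ []
instance (value : Int) (bins : List Int) : Decidable (Pre_get_bin value bins) := by unfold Pre_get_bin; infer_instance
def pvWitness_get_bin : Int × List Int := (5, [1, 10])

def Spec_get_bin (value : Int) (bins : List Int) (out : Int) : Prop := out = get_bin_alt value bins
instance (value : Int) (bins : List Int) (out : Int) : Decidable (Spec_get_bin value bins out) := by unfold Spec_get_bin; infer_instance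

-- ===== CLAIM (what is proved, stated in full; the proofs are below) =====
def Claim_equal_get_bin : Prop := ∀ (value : Int) (bins : List Int), Dom_get_bin value bins → Pre_get_bin value bins → Spec_get_bin value bins (get_bin value bins)

-- ===== LEMMAS AND PROOFS =====

-- The binary search returns an index r ≤ len splitting the sorted list into a prefix ≤ value
-- and a suffix > value.
theorem pvBsLoop_spec (s : List Int) (value : Int) (hs : s.Pairwise (· ≤ ·)) :
    ∀ (fuel lo hi : Nat), hi - lo ≤ fuel → lo ≤ hi → hi ≤ s.length →
    (∀ j, j < lo → s.getD j 0 ≤ value) →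
    (∀ j, hi ≤ j → j < s.length → value < s.getD j 0) →
    (∀ j, j < pvBsLoop s value fuel lo hi → s.getD j 0 ≤ value) ∧
    (∀ j, pvBsLoop s value fuel lo hi ≤ j → j < s.length → value < s.getD j 0) ∧
    pvBsLoop s value fuel lo hi ≤ s.length := by
  intro fuel
  induction fuel with
  | zero =>
    intro lo hi hn hlh hhl hpre hsuf
    have : lo = hi := by omega
    subst this
    exact ⟨hpre, hsuf, by simpa [pvBsLoop] using hhl⟩
  | succ fuel ih =>
    intro lo hi hn hlh hhl hpre hsuf
    rw [pvBsLoop]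
    by_cases h : lo < hi
    · simp only [h, if_true]
      set mid := (lo + hi) / 2 with hmid
      have hm1 : lo ≤ mid := by omega
      have hm2 : mid < hi := by omega
      have hmlen : mid < s.length := by omega
      by_cases hv : value < s.getD mid 0
      · simp only [hv, if_true]
        refine ih lo mid (by omega) (by omega) (by omega) hpre ?_
        intro j hj1 hj2
        have : s.getD mid 0 ≤ s.getD j 0 := by
          rcases Nat.eq_or_lt_of_le hj1 with he | hlt
          · subst he; exact le_refl _
          · rw [List.getD_eq_getElem s 0 hmlen, List.getD_eq_getElem s 0 hj2]
            exact (List.pairwise_iff_getElem.mp hs) mid j hmlen hj2 hlt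
        omega
      · simp only [hv, if_false]
        refine ih (mid + 1) hi (by omega) (by omega) hhl ?_ hsuf
        intro j hj
        have hjlen : j < s.length := by omega
        have : s.getD j 0 ≤ s.getD mid 0 := by
          rcases Nat.eq_or_lt_of_le (Nat.lt_succ_iff.mp hj) with he | hlt
          · subst he; exact le_refl _
          · rw [List.getD_eq_getElem s 0 hmlen, List.getD_eq_getElem s 0 hjlen]
            exact (List.pairwise_iff_getElem.mp hs) j mid hjlen hmlen hlt
        omega
    · simp only [h, if_false]
      have : lo = hi := by omega
      subst this
      exact ⟨hpre, hsuf, by omega⟩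

-- A's scan returns the element at the split index (or none if the whole list is ≤ value).
theorem pvLoopA_eq (value : Int) :
    ∀ (s : List Int) (r : Nat),
    (∀ j, j < r → s.getD j 0 ≤ value) →
    (∀ j, r ≤ j → j < s.length → value < s.getD j 0) →
    r ≤ s.length →
    pvLoopA value s = if r < s.length then some (s.getD r 0) else none := by
  intro s
  induction s with
  | nil => intro r _ _ hr; simp at hr; simp [pvLoopA, hr]
  | cons x xs ih =>
    intro r hpre hsuf hr
    match r with
    | 0 =>
      have hx : value < x := by
        have := hsuf 0 (by omega) (by simp)
        simpa using this
      simp [pvLoopA, hx]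
    | r' + 1 =>
      have hx : x ≤ value := by have := hpre 0 (by omega); simpa using this
      have hnx : ¬ value < x := by omega
      rw [pvLoopA, if_neg hnx]
      have := ih r' (fun j hj => by have := hpre (j + 1) (by omega); simpa using this)
        (fun j hj1 hj2 => by
          have := hsuf (j + 1) (by omega) (by simpa using hj2)
          simpa using this)
        (by simpa using hr)
      rw [this]
      by_cases hlt : r' < xs.length
      · rw [if_pos hlt, if_pos (by simpa using Nat.succ_lt_succ hlt)]
        simp
      · rw [if_neg hlt, if_neg (by simp; omega)]

-- The last element of a nonempty pairwise-≤ list is an upper bound.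
theorem getLast_isMax (s : List Int) (hs : s.Pairwise (· ≤ ·)) (h : s ≠ []) :
    ∀ y ∈ s, y ≤ s.getLast h := by
  intro y hy
  obtain ⟨i, hi, rfl⟩ := List.mem_iff_getElem.mp hy
  rw [List.getLast_eq_getElem]
  rcases Nat.lt_or_ge i (s.length - 1) with hlt | hge
  · exact (List.pairwise_iff_getElem.mp hs) i (s.length - 1) hi (by omega) hlt
  · have : i = s.length - 1 := by omega
    subst this
    exact le_refl _

-- ===== VERDICT (by name: the statement is the Claim_ definition above) =====
theorem get_bin_spec : Claim_equal_get_bin := by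
  intro value bins _ hpre
  unfold Spec_get_bin get_bin get_bin_alt
  set s := PySem.List.sorted bins (fun x => x) with hsdef
  have hs : s.Pairwise (· ≤ ·) := PySem.List.sorted_pairwise bins (fun x => x)
  have hsne : s ≠ [] := by
    intro h
    exact hpre ((PySem.List.sorted_eq_nil_iff bins (fun x => x) false).mp h)
  set r := pvBsLoop s value s.length 0 s.length with hrdef
  have hspec := pvBsLoop_spec s value hs s.length 0 s.length (by omega) (by omega) (le_refl _)
    (by omega) (fun j hj1 hj2 => by omega)
  obtain ⟨hpre', hsuf', hrle⟩ := hspec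
  have hla := pvLoopA_eq value s r hpre' hsuf' hrle
  by_cases hlt : r < s.length
  · simp only [hla, ← hrdef, if_pos hlt]
  · simp only [hla, ← hrdef, if_neg hlt]
    -- r = length: every element is ≤ value; A takes the max path, B takes bins[-1]
    have hlast := PySem.List.pyGetD_neg_one s 0 hsne
    rcases hm : PySem.List.max? s (fun x => x) with _ | m
    · exact absurd ((PySem.List.max?_eq_none_iff s (fun x => x)).mp hm) hsne
    · have hmmem : m ∈ s := PySem.List.max?_mem hm
      have hmax : ∀ y ∈ s, y ≤ m := fun y hy => PySem.List.max?_isMax hm y hy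
      have h1 : s.getLast hsne ≤ m := hmax _ (List.getLast_mem hsne)
      have h2 : m ≤ s.getLast hsne := getLast_isMax s hs hsne m hmmem
      have hme : m = s.getLast hsne := le_antisymm h2 h1
      simp only [hlast, hme, ge_iff_le, le_refl, if_true]
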